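-- pv_equiv track=rewrite | github.com/Lxxkx22/CAN-IDS | project_utils/can_data_analyzer.py | _is_counter_pattern
-- ===== SOURCE A (Python) =====
-- from typing import Dict, List, Tuple, Any, Optional
--
-- def _is_counter_pattern(values: List[int]) -> bool:
--     """检测是否为计数器模式"""
--     if len(values) < 10:
--         return False
--
--     # 检查连续递增模式
--     consecutive_increases = 0
--     for i in range(1, min(100, len(values))):
--         if values[i] == (values[i-1] + 1) % 256:
--             consecutive_increases += 1
--         elif consecutive_increases > 0:
--             break
--
--     return consecutive_increases >= 5
-- ===== SOURCE B (Python) =====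
-- def _is_counter_pattern(values):
--     if len(values) < 10:
--         return False
--     limit = min(100, len(values))
--     # anchor: first pair index t whose successor is (values[t]+1) % 256
--     t = next((i for i in range(limit - 1)
--               if values[i + 1] == (values[i] + 1) % 256), None)
--     if t is None or t + 5 >= limit:
--         return False
--     # verify a fixed window of 5 against the anchor value by modular arithmetic
--     return all(values[t + k] == (values[t] + k) % 256 for k in range(2, 6))
-- ===== Notes on version B (the rewrite author's own statement) =====
-- stated objective: alternative
-- what changed: A counts the first run of increments with a stateful scan-and-break; B instead locates the anchor (first incrementing pair) and then verifies a fixed window of five steps directly against the anchor value via values[t+k] == (values[t]+k) % 256, with no run counter and no per-pair chain.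
import Mathlib
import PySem

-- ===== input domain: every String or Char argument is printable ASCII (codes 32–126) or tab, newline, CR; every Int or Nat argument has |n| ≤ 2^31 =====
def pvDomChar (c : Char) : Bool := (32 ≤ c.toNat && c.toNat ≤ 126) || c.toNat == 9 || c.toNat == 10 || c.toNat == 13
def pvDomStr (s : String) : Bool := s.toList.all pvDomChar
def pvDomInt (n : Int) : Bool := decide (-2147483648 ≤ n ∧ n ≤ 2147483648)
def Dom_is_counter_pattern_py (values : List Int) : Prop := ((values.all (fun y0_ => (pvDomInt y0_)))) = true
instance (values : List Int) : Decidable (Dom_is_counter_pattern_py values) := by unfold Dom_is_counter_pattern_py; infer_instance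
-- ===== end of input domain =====

-- B replaces A's run-counting scan by locating the first incrementing pair (the anchor) and then
-- verifying a fixed window of 5 steps directly against the anchor value via (anchor + k) % 256
-- (alternative decomposition: no run counter, no per-pair chain).

-- ===== PORT A =====
-- the for-loop over range(1, min(100, len(values))) with its break, state = consecutive_increases
def aLoop (values : List Int) : List Int → Int → Int
  | [], c => c
  | i :: rest, c =>
    match PySem.List.pyGet? values i, PySem.List.pyGet? values (i - 1) with
    | some vi, some vp =>
      if vi = PySem.Int.mod (vp + 1) 256 then aLoop values rest (c + 1)
      else if c > 0 then c
      else aLoop values rest c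
    | _, _ => c  -- unreachable: every index of the range is in bounds

def is_counter_pattern_py (values : List Int) : Bool :=
  if values.length < 10 then false
  else decide (aLoop values (PySem.List.pyRange 1 (min 100 (values.length : Int)) 1) 0 ≥ 5)

-- ===== PORT B =====
-- values[i+1] == (values[i]+1) % 256 for an in-range pair index i (indices produced by range are in bounds)
def pairT (values : List Int) (i : Int) : Bool :=
  decide (PySem.List.pyGetD values (i + 1) 0 = PySem.Int.mod (PySem.List.pyGetD values i 0 + 1) 256)

def is_counter_pattern_py_alt (values : List Int) : Bool :=
  if values.length < 10 then false
  else
    let limit : Int := min 100 (values.length : Int)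
    -- next((i for i in range(limit-1) if …), None)
    match (PySem.List.pyRange 0 (limit - 1) 1).find? (pairT values) with
    | none => false
    | some t =>
      if limit ≤ t + 5 then false
      else (PySem.List.pyRange 2 6 1).all (fun k =>
        decide (PySem.List.pyGetD values (t + k) 0 = PySem.Int.mod (PySem.List.pyGetD values t 0 + k) 256))

-- ===== PRECONDITION & SPEC =====
def Spec_is_counter_pattern_py (values : List Int) (out : Bool) : Prop := out = is_counter_pattern_py_alt values
instance (values : List Int) (out : Bool) : Decidable (Spec_is_counter_pattern_py values out) := by unfold Spec_is_counter_pattern_py; infer_instance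

-- ===== CLAIM (what is proved, stated in full; the proofs are below) =====
def Claim_equal_is_counter_pattern_py : Prop := ∀ (values : List Int), Dom_is_counter_pattern_py values → Spec_is_counter_pattern_py values (is_counter_pattern_py values)

-- ===== LEMMAS AND PROOFS =====

-- the loop state machine on the bare indicator list
def bLoop : List Bool → Int → Int
  | [], c => c
  | b :: rest, c => if b then bLoop rest (c + 1) else if c > 0 then c else bLoop rest c

def ind (values : List Int) (i : Int) : Bool :=
  decide (PySem.List.pyGetD values i 0 = PySem.Int.mod (PySem.List.pyGetD values (i - 1) 0 + 1) 256)

theorem aLoop_eq_bLoop (values : List Int) (r : List Int) (c : Int)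
    (h : ∀ i ∈ r, 1 ≤ i ∧ i < values.length) :
    aLoop values r c = bLoop (r.map (ind values)) c := by
  induction r generalizing c with
  | nil => rfl
  | cons i rest ih =>
    have hi := h i (List.mem_cons_self ..)
    have h1 : PySem.List.pyGet? values i = some (values[i.toNat]) :=
      PySem.List.pyGet?_eq_some_getElem values (by omega) (by omega)
    have h2 : PySem.List.pyGet? values (i - 1) = some (values[(i - 1).toNat]) :=
      PySem.List.pyGet?_eq_some_getElem values (by omega) (by omega)
    have g1 : PySem.List.pyGetD values i 0 = values[i.toNat] :=
      PySem.List.pyGetD_eq_getElem values 0 (by omega) (by omega)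
    have g2 : PySem.List.pyGetD values (i - 1) 0 = values[(i - 1).toNat] :=
      PySem.List.pyGetD_eq_getElem values 0 (by omega) (by omega)
    simp only [aLoop, h1, h2, List.map, bLoop, ind, g1, g2]
    have htail : ∀ j ∈ rest, 1 ≤ j ∧ j < values.length := fun j hj => h j (List.mem_cons_of_mem _ hj)
    by_cases hb : values[i.toNat] = PySem.Int.mod (values[(i - 1).toNat] + 1) 256
    · simp [hb, ih _ htail]
    · simp only [hb, if_false, decide_eq_true_eq]
      by_cases hc : c > 0
      · simp [hc]
      · simp [hc, ih _ htail]

theorem bLoop_pos (l : List Bool) (c : Int) (hc : 0 < c) :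
    bLoop l c = c + ((l.takeWhile id).length : Int) := by
  induction l generalizing c with
  | nil => simp [bLoop]
  | cons b rest ih =>
    cases b with
    | true => simp [bLoop, List.takeWhile, ih (c + 1) (by omega)]; omega
    | false => simp [bLoop, List.takeWhile, hc]

theorem bLoop_zero (l : List Bool) :
    bLoop l 0 = (((l.dropWhile (fun b => !b)).takeWhile id).length : Int) := by
  induction l with
  | nil => rfl
  | cons b rest ih =>
    cases b with
    | true =>
      simp only [bLoop, if_true, List.dropWhile_cons, Bool.not_true]
      rw [bLoop_pos rest (0 + 1) (by omega)]
      simp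
      omega
    | false => simpa [bLoop, List.dropWhile_cons] using ih

-- A's indicator list over range(1, L) is B's pair predicate over range(0, L-1)
theorem ind_map_eq_pairT_map (values : List Int) (L : Int) :
    (PySem.List.pyRange 1 L 1).map (ind values)
      = (PySem.List.pyRange 0 (L - 1) 1).map (pairT values) := by
  apply List.ext_getElem
  · simp [PySem.List.length_pyRange_one]
  · intro j hj hj'
    simp only [List.getElem_map, PySem.List.getElem_pyRange_one, ind, pairT]
    have e1 : (1 : Int) + (j : Int) = 0 + (j : Int) + 1 := by ring
    rw [e1]
    have e2 : (0 : Int) + (j : Int) + 1 - 1 = 0 + (j : Int) := by ring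
    rw [e2]

-- if find? misses, every indicator is false and the dropWhile empties the list
theorem find?_none_dropWhile (p : Int → Bool) (l : List Int)
    (h : l.find? p = none) :
    (l.map p).dropWhile (fun b => !b) = [] := by
  rw [List.dropWhile_eq_nil_iff]
  intro x hx
  rcases List.mem_map.mp hx with ⟨i, hi, rfl⟩
  simp [List.find?_eq_none.mp h i hi]

-- if find? hits t on a range, t is in the range, p t holds, and dropWhile lands exactly at t
theorem find?_pyRange_some (p : Int → Bool) (b : Int) :
    ∀ (a t : Int), (PySem.List.pyRange a b 1).find? p = some t →
      a ≤ t ∧ t < b ∧ p t = true ∧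
        ((PySem.List.pyRange a b 1).map p).dropWhile (fun x => !x)
          = (PySem.List.pyRange t b 1).map p := by
  intro a
  induction hn : (b - a).toNat generalizing a with
  | zero =>
    intro t ht
    rw [PySem.List.pyRange_one_eq_nil (by omega)] at ht
    simp at ht
  | succ n ih =>
    intro t ht
    rw [PySem.List.pyRange_one_cons (by omega)] at ht ⊢
    by_cases hp : p a
    · rw [List.find?_cons_of_pos hp] at ht
      injection ht with ht; subst ht
      refine ⟨le_refl _, by omega, hp, ?_⟩
      conv_rhs => rw [PySem.List.pyRange_one_cons (by omega)]
      simp [hp]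
    · rw [List.find?_cons_of_neg (by simp [hp])] at ht
      obtain ⟨h1, h2, h3, h4⟩ := ih (a + 1) (by omega) t ht
      refine ⟨by omega, h2, h3, ?_⟩
      simp [hp, h4]

-- the first increment-run has length ≥ 5 iff five consecutive indicators fit and hold
theorem takeWhile_five (p : Int → Bool) (t b : Int) :
    (5 ≤ (((PySem.List.pyRange t b 1).map p).takeWhile id).length)
      ↔ (t + 5 ≤ b ∧ p t ∧ p (t+1) ∧ p (t+2) ∧ p (t+3) ∧ p (t+4)) := by
  by_cases hb : t + 5 ≤ b
  · rw [PySem.List.pyRange_one_append t (t+5) b (by omega) hb]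
    have h5 : PySem.List.pyRange t (t+5) 1 = [t, t+1, t+2, t+3, t+4] := by
      rw [PySem.List.pyRange_one_cons (by omega), PySem.List.pyRange_one_cons (by omega),
          PySem.List.pyRange_one_cons (by omega), PySem.List.pyRange_one_cons (by omega),
          PySem.List.pyRange_one_cons (by omega), PySem.List.pyRange_one_eq_nil (by omega)]
      norm_num
      omega
    rw [h5]
    by_cases p0 : p t
    · by_cases p1 : p (t+1)
      · by_cases p2 : p (t+2)
        · by_cases p3 : p (t+3)
          · by_cases p4 : p (t+4)
            · simp only [List.map_cons, List.cons_append,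
                List.takeWhile_cons, p0, p1, p2, p3, p4, id, if_true,
                List.length_cons]
              simp [hb]
            · simp [List.takeWhile, p0, p1, p2, p3, p4]
          · simp [List.takeWhile, p0, p1, p2, p3]
        · simp [List.takeWhile, p0, p1, p2]
      · simp [List.takeWhile, p0, p1]
    · simp [p0]
  · have hlen : (((PySem.List.pyRange t b 1).map p).takeWhile id).length
        ≤ ((PySem.List.pyRange t b 1).map p).length := (List.takeWhile_sublist id).length_le
    simp only [List.length_map, PySem.List.length_pyRange_one] at hlen
    constructor
    · intro h; omega
    · intro h; omega

-- ((x + k) % 256 + 1) % 256 = (x + k + 1) % 256, in Python's mod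
theorem mod_step (x : Int) : PySem.Int.mod (PySem.Int.mod x 256 + 1) 256 = PySem.Int.mod (x + 1) 256 := by
  simp only [PySem.Int.mod_eq_emod_of_pos (show (0:Int) < 256 by norm_num)]
  omega

-- given the window formula up to k, the next pair indicator is the window formula at k+1
theorem pair_chain (values : List Int) (t k : Int)
    (hk : PySem.List.pyGetD values (t + k) 0 = PySem.Int.mod (PySem.List.pyGetD values t 0 + k) 256) :
    pairT values (t + k)
      = decide (PySem.List.pyGetD values (t + (k+1)) 0
          = PySem.Int.mod (PySem.List.pyGetD values t 0 + (k+1)) 256) := by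
  have e : t + k + 1 = t + (k + 1) := by ring
  have e2 : PySem.List.pyGetD values t 0 + k + 1 = PySem.List.pyGetD values t 0 + (k + 1) := by ring
  simp only [pairT, hk, e, mod_step, e2]

-- the five consecutive indicators from the anchor = anchor indicator + B's window formula
theorem window_eq (values : List Int) (t : Int) (hp : pairT values t = true) :
    ((pairT values (t+1) ∧ pairT values (t+2) ∧ pairT values (t+3) ∧ pairT values (t+4))
      ↔ (∀ k ∈ ([2, 3, 4, 5] : List Int),
          PySem.List.pyGetD values (t + k) 0 = PySem.Int.mod (PySem.List.pyGetD values t 0 + k) 256)) := by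
  have h1 : PySem.List.pyGetD values (t + 1) 0
      = PySem.Int.mod (PySem.List.pyGetD values t 0 + 1) 256 := by
    have := hp; simp only [pairT, decide_eq_true_eq] at this; simpa using this
  constructor
  · rintro ⟨q1, q2, q3, q4⟩
    have f2 : PySem.List.pyGetD values (t + 2) 0
        = PySem.Int.mod (PySem.List.pyGetD values t 0 + 2) 256 := by
      have h := pair_chain values t 1 (by simpa using h1)
      rw [h] at q1; simp only [decide_eq_true_eq] at q1; simpa using q1
    have f3 : PySem.List.pyGetD values (t + 3) 0
        = PySem.Int.mod (PySem.List.pyGetD values t 0 + 3) 256 := by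
      have h := pair_chain values t 2 f2
      rw [h] at q2; simp only [decide_eq_true_eq] at q2; simpa using q2
    have f4 : PySem.List.pyGetD values (t + 4) 0
        = PySem.Int.mod (PySem.List.pyGetD values t 0 + 4) 256 := by
      have h := pair_chain values t 3 f3
      rw [h] at q3; simp only [decide_eq_true_eq] at q3; simpa using q3
    have f5 : PySem.List.pyGetD values (t + 5) 0
        = PySem.Int.mod (PySem.List.pyGetD values t 0 + 5) 256 := by
      have h := pair_chain values t 4 f4
      rw [h] at q4; simp only [decide_eq_true_eq] at q4; simpa using q4
    intro k hk
    fin_cases hk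
    · exact f2
    · exact f3
    · exact f4
    · exact f5
  · intro hf
    have f2 := hf 2 (by norm_num)
    have f3 := hf 3 (by norm_num)
    have f4 := hf 4 (by norm_num)
    have f5 := hf 5 (by norm_num)
    refine ⟨?_, ?_, ?_, ?_⟩
    · rw [pair_chain values t 1 (by simpa using h1)]
      simp only [decide_eq_true_eq]; simpa using f2
    · rw [pair_chain values t 2 f2]
      simp only [decide_eq_true_eq]; simpa using f3
    · rw [pair_chain values t 3 f3]
      simp only [decide_eq_true_eq]; simpa using f4
    · rw [pair_chain values t 4 f4]
      simp only [decide_eq_true_eq]; simpa using f5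

-- ===== VERDICT (by name: the statement is the Claim_ definition above) =====
theorem is_counter_pattern_py_spec : Claim_equal_is_counter_pattern_py := by
  intro values _
  unfold Spec_is_counter_pattern_py is_counter_pattern_py is_counter_pattern_py_alt
  by_cases h10 : values.length < 10
  · simp [h10]
  · simp only [if_neg h10]
    set L : Int := min 100 (values.length : Int) with hL
    have hA : aLoop values (PySem.List.pyRange 1 L 1) 0
        = (((((PySem.List.pyRange 0 (L-1) 1).map (pairT values)).dropWhile
            (fun b => !b)).takeWhile id).length : Int) := by
      rw [aLoop_eq_bLoop values _ 0 ?_, ind_map_eq_pairT_map, bLoop_zero]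
      intro i hi
      rw [PySem.List.mem_pyRange_one] at hi
      omega
    rcases hfind : (PySem.List.pyRange 0 (L - 1) 1).find? (pairT values) with _ | t
    · rw [hA, find?_none_dropWhile _ _ hfind]
      simp
    · obtain ⟨ht0, htb, hpt, hdrop⟩ := find?_pyRange_some (pairT values) (L-1) 0 t hfind
      rw [hA, hdrop]
      have h56 : PySem.List.pyRange 2 6 1 = ([2, 3, 4, 5] : List Int) := by decide
      rw [h56]
      dsimp only
      by_cases hcut : L ≤ t + 5
      · rw [if_pos hcut]
        simp only [decide_eq_false_iff_not]
        intro hcontra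
        have h5 : 5 ≤ (((PySem.List.pyRange t (L-1) 1).map (pairT values)).takeWhile id).length := by
          exact_mod_cast hcontra
        have := (takeWhile_five (pairT values) t (L-1)).mp h5
        omega
      · rw [if_neg hcut]
        have hiff := takeWhile_five (pairT values) t (L-1)
        have hwin := window_eq values t hpt
        by_cases hall : ∀ k ∈ ([2, 3, 4, 5] : List Int),
            PySem.List.pyGetD values (t + k) 0 = PySem.Int.mod (PySem.List.pyGetD values t 0 + k) 256
        · have hb : (([2, 3, 4, 5] : List Int).all (fun k =>
              decide (PySem.List.pyGetD values (t + k) 0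
                = PySem.Int.mod (PySem.List.pyGetD values t 0 + k) 256))) = true := by
            simp only [List.all_eq_true, decide_eq_true_eq]; exact hall
          rw [hb]
          obtain ⟨q1, q2, q3, q4⟩ := hwin.mpr hall
          have h5 := hiff.mpr ⟨by omega, hpt, q1, q2, q3, q4⟩
          simp only [decide_eq_true_eq, ge_iff_le]
          exact_mod_cast h5
        · have hb : (([2, 3, 4, 5] : List Int).all (fun k =>
              decide (PySem.List.pyGetD values (t + k) 0
                = PySem.Int.mod (PySem.List.pyGetD values t 0 + k) 256))) = false := by
            rw [← Bool.not_eq_true]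
            simp only [List.all_eq_true, decide_eq_true_eq]; exact hall
          rw [hb]
          simp only [decide_eq_false_iff_not]
          intro hcontra
          have h5 : 5 ≤ (((PySem.List.pyRange t (L-1) 1).map (pairT values)).takeWhile id).length := by
            exact_mod_cast hcontra
          obtain ⟨_, _, q1, q2, q3, q4⟩ := hiff.mp h5
          exact hall (hwin.mp ⟨q1, q2, q3, q4⟩)
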